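-- pv_equiv track=rewrite | github.com/joonyoungchoi0801/programers-study | 프로그래머스/Lv.1/140108. 문자열 나누기/문자열 나누기.py | solution
-- ===== SOURCE A (Python) =====
-- def solution(s):
--     answer = 0
--     start, end = 0, 0
--     for i in range(len(s)):
--         if start == end:
--             answer += 1
--             x = s[i]
--             end, start = 0, 0
--
--         if s[i] == x:
--             start += 1
--         else:
--             end += 1
--
--     return answer
-- ===== SOURCE B (Python) =====
-- def balanced_prefix_len(t):
--     """Length of the shortest prefix of t in which the leading character occurs
--     exactly as often as all other characters combined; len(t) if none exists."""
--     signs = (1 if c == t[0] else -1 for c in t)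
--     total = 0
--     for j, v in enumerate(signs):
--         total += v
--         if total == 0:
--             return j + 1
--     return len(t)
--
--
-- def solution(s):
--     pieces = 0
--     t = s
--     while t:
--         t = t[balanced_prefix_len(t):]
--         pieces += 1
--     return pieces
-- ===== Notes on version B (the rewrite author's own statement) =====
-- stated objective: alternative
-- what changed: Replaced A's single flat loop carrying cross-iteration counters and a leader variable with a peel-off-prefix decomposition: a helper turns the current suffix into a +1/-1 sign stream and finds the first zero of its running sum (the balanced-prefix length), and the driver repeatedly slices that prefix off, counting pieces.
import Mathlib
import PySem

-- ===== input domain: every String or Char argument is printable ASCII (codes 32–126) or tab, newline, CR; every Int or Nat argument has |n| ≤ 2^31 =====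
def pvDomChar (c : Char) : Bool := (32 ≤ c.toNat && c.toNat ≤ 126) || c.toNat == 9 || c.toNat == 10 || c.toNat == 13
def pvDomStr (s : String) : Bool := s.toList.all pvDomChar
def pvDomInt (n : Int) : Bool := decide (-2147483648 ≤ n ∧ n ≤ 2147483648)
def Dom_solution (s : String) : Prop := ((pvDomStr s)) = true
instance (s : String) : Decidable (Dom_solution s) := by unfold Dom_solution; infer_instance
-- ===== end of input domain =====

-- B replaces A's single flat loop with inline counters by a peel-off-prefix
-- decomposition: per suffix, build a +1/-1 sign list, find the first zero of its
-- running sum, and slice that prefix off (objective: alternative; not faster).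

-- ===== PORT A =====
-- A's loop body over state (answer, start, end, x); x is the Python local variable
-- carried across iterations (initial dummy ' ' is never compared before being set,
-- since start = end = 0 at the first iteration).
def solStep (st : Int × Int × Int × Char) (c : Char) : Int × Int × Int × Char :=
  let (answer, start, «end», x) := st
  let (answer, start, «end», x) :=
    if start = «end» then (answer + 1, (0 : Int), (0 : Int), c)
    else (answer, start, «end», x)
  if c = x then (answer, start + 1, «end», x) else (answer, start, «end» + 1, x)

def solution (s : String) : Int :=
  (s.toList.foldl solStep (0, 0, 0, ' ')).1

-- ===== PORT B =====
-- signs = [1 if c == t[0] else -1 for c in t]  (x = t[0])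
def signsFor (x : Char) (t : List Char) : List Int :=
  t.map (fun c => if c = x then 1 else -1)

-- the 'for j, v in enumerate(signs)' scan of balanced_prefix_len: number of
-- elements consumed up to (and including) the first zero of the running sum
-- (Python's j + 1), none if the sum never hits zero
def bpScan (total : Int) : List Int → Option Nat
  | [] => none
  | v :: rest => if total + v = 0 then some 1 else (bpScan (total + v) rest).map (· + 1)

-- balanced_prefix_len(t); t[0] is only evaluated on nonempty t in B, so headD's
-- default is never compared
def bpLen (t : List Char) : Nat :=
  (bpScan 0 (signsFor (t.headD ' ') t)).getD t.length

-- the 'while t:' driver of Source B, with a structural fuel argument as totality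
-- guard (fuel = initial length suffices, since each iteration drops at least one
-- character; the fuel-exhausted case is unreachable). t[cut:] with 0 ≤ cut is List.drop.
def altLoop : Nat → Int → List Char → Int
  | _, pieces, [] => pieces
  | 0, pieces, _ :: _ => pieces
  | Nat.succ fuel, pieces, t@(_ :: _) => altLoop fuel (pieces + 1) (t.drop (bpLen t))

def solution_alt (s : String) : Int := altLoop s.toList.length 0 s.toList

-- ===== PRECONDITION & SPEC =====
def Spec_solution (s : String) (out : Int) : Prop := out = solution_alt s
instance (s : String) (out : Int) : Decidable (Spec_solution s out) := by unfold Spec_solution; infer_instance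

-- ===== CLAIM (what is proved, stated in full; the proofs are below) =====
def Claim_equal_solution : Prop := ∀ (s : String), Dom_solution s → Spec_solution s (solution s)

-- ===== LEMMAS AND PROOFS =====

theorem altLoop_nil (n : Nat) (pieces : Int) : altLoop n pieces [] = pieces := by
  cases n <;> simp [altLoop]

theorem bpScan_cons (total v : Int) (rest : List Int) :
    bpScan total (v :: rest)
      = if total + v = 0 then some 1 else (bpScan (total + v) rest).map (· + 1) := rfl

theorem bpScan_pos : ∀ (total : Int) (l : List Int) (k : Nat), bpScan total l = some k → 1 ≤ k := by
  intro total l k h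
  cases l with
  | nil => simp [bpScan] at h
  | cons v rest =>
    unfold bpScan at h
    split at h
    · injection h with h; omega
    · rcases Option.map_eq_some_iff.mp h with ⟨k', _, rfl⟩; omega

theorem bpLen_cons_pos (c : Char) (rest : List Char) : 1 ≤ bpLen (c :: rest) := by
  unfold bpLen
  cases h : bpScan 0 (signsFor ((c :: rest).headD ' ') (c :: rest)) with
  | none => simp
  | some k => simpa [h] using bpScan_pos _ _ _ h

-- The fuel is irrelevant as long as it covers the list's length.
theorem altLoop_fuel (n : Nat) :
    ∀ (m : Nat) (l : List Char) (pieces : Int),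
      l.length ≤ n → l.length ≤ m → altLoop n pieces l = altLoop m pieces l := by
  induction n with
  | zero =>
    intro m l pieces hn _
    have : l = [] := List.eq_nil_of_length_eq_zero (Nat.le_zero.mp hn)
    subst this; cases m <;> simp [altLoop]
  | succ n ih =>
    intro m l pieces hn hm
    cases l with
    | nil => cases m <;> simp [altLoop]
    | cons c rest =>
      cases m with
      | zero => exact absurd hm (by simp)
      | succ m =>
        simp only [altLoop]
        have hd : ((c :: rest).drop (bpLen (c :: rest))).length ≤ rest.length := by
          have h1 : 1 ≤ bpLen (c :: rest) := bpLen_cons_pos c rest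
          rw [List.length_drop]
          simp only [List.length_cons]
          omega
        exact ih m _ _ (le_trans hd (Nat.succ_le_succ_iff.mp hn)) (le_trans hd (Nat.succ_le_succ_iff.mp hm))

theorem fold_eq_loop (l : List Char) :
    ∀ (n : Nat) (answer same diff : Int) (x : Char), l.length ≤ n →
      (l.foldl solStep (answer, same, diff, x)).1 =
        if same = diff then altLoop n answer l
        else altLoop n answer
          (match bpScan (same - diff) (signsFor x l) with
           | some k => l.drop k
           | none => ([] : List Char)) := by
  induction l with
  | nil =>
    intro n answer same diff x _
    simp [signsFor, bpScan, altLoop_nil]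
  | cons c rest ih =>
    intro n answer same diff x hn
    obtain ⟨m, rfl⟩ : ∃ m, n = m + 1 := by
      cases n with
      | zero => exact absurd hn (by simp)
      | succ m => exact ⟨m, rfl⟩
    have hr : rest.length ≤ m + 1 := le_trans (by simp) hn
    by_cases h : same = diff
    · -- A resets (new segment); B peels the balanced prefix of c :: rest
      simp only [List.foldl_cons, solStep, h, if_true]
      rw [ih (m + 1) (answer + 1) (0 + 1) 0 c hr]
      rw [if_neg (show ¬((0:Int) + 1 = 0) by norm_num)]
      have hsg : signsFor c (c :: rest) = 1 :: signsFor c rest := by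
        simp [signsFor]
      have hbl : bpLen (c :: rest)
          = ((bpScan 1 (signsFor c rest)).map (· + 1)).getD (rest.length + 1) := by
        unfold bpLen
        rw [List.headD_cons, hsg, bpScan_cons]
        simp
      simp only [altLoop, hbl]
      have hone : (0 : Int) + 1 - 0 = 1 := by norm_num
      rw [hone]
      cases hb : bpScan 1 (signsFor c rest) with
      | some k =>
        simp only [Option.map_some, Option.getD_some, List.drop_succ_cons]
        have hl : (rest.drop k).length ≤ m := by
          rw [List.length_drop]
          have hk := bpScan_pos _ _ _ hb
          have := Nat.succ_le_succ_iff.mp hn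
          omega
        exact altLoop_fuel (m + 1) m _ (answer + 1) (le_trans hl (Nat.le_succ m)) hl
      | none =>
        simp only [Option.map_none, Option.getD_none, List.drop_succ_cons, List.drop_length]
        rw [altLoop_nil, altLoop_nil]
    · -- inside a segment: A updates a counter, B's scan consumes one sign
      simp only [List.foldl_cons, solStep, if_neg h]
      have hsg : signsFor x (c :: rest)
          = (if c = x then (1 : Int) else -1) :: signsFor x rest := by
        simp [signsFor]
      by_cases hc : c = x
      · rw [if_pos hc, ih (m + 1) answer (same + 1) diff x hr]
        rw [hsg, if_pos hc]
        by_cases hb : same + 1 = diff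
        · rw [if_pos hb]
          have : bpScan (same - diff) (1 :: signsFor x rest) = some 1 := by
            rw [bpScan_cons, if_pos (by omega)]
          simp [this]
        · rw [if_neg hb]
          have hns : ¬ (same - diff + 1 = 0) := by omega
          have harg : same - diff + 1 = same + 1 - diff := by ring
          have : bpScan (same - diff) (1 :: signsFor x rest)
              = (bpScan (same + 1 - diff) (signsFor x rest)).map (· + 1) := by
            rw [bpScan_cons, if_neg hns, harg]
          rw [this]
          cases bpScan (same + 1 - diff) (signsFor x rest) <;>
            simp [List.drop_succ_cons]
      · rw [if_neg hc, ih (m + 1) answer same (diff + 1) x hr]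
        rw [hsg, if_neg hc]
        by_cases hb : same = diff + 1
        · rw [if_pos hb]
          have : bpScan (same - diff) ((-1 : Int) :: signsFor x rest) = some 1 := by
            rw [bpScan_cons, if_pos (by omega)]
          simp [this]
        · rw [if_neg hb]
          have hns : ¬ (same - diff + -1 = 0) := by omega
          have harg : same - diff + -1 = same - (diff + 1) := by ring
          have : bpScan (same - diff) ((-1 : Int) :: signsFor x rest)
              = (bpScan (same - (diff + 1)) (signsFor x rest)).map (· + 1) := by
            rw [bpScan_cons, if_neg hns, harg]
          rw [this]
          cases bpScan (same - (diff + 1)) (signsFor x rest) <;>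
            simp [List.drop_succ_cons]

-- ===== VERDICT (by name: the statement is the Claim_ definition above) =====
theorem solution_spec : Claim_equal_solution := by
  intro s _
  unfold Spec_solution solution solution_alt
  rw [fold_eq_loop s.toList s.toList.length 0 0 0 ' ' (le_refl _)]
  simp
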